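-- pv_equiv track=rewrite | github.com/anaclasosi/palavras-indeterminadas | 2_num_primos.py | num_primo
-- ===== SOURCE A (Python) =====
-- nucleotideos = {"a":2, "c":3, "g":5, "t":7, "n":210,  "A":2, "C":3, "G":5, "T":7, "N":210}
--
-- def num_primo(s):
--     str_primos = ""
--     lista_primos = []
--     acc = 1
--     for i in range(len(s)):
--         if s[i] == "/":
--             str_primos += str(acc) + "/"
--             lista_primos.append(acc)
--             acc = 1
--         else:
--
--             acc = acc*nucleotideos[s[i]]
--     return str_primos, lista_primos
-- ===== SOURCE B (Python) =====
-- nucleotideos = {"a":2, "c":3, "g":5, "t":7, "n":210,  "A":2, "C":3, "G":5, "T":7, "N":210}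
--
-- def num_primo(s):
--     products = []
--     for seg in s.split("/"):
--         p = 1
--         for ch in seg:
--             p *= nucleotideos[ch]
--         products.append(p)
--     lista_primos = products[:-1]
--     str_primos = "".join(str(p) + "/" for p in lista_primos)
--     return str_primos, lista_primos
-- ===== Notes on version B (the rewrite author's own statement) =====
-- stated objective: idiomatic
-- what changed: Replaced the single-pass accumulator-and-flush loop by splitting on '/', computing one product per segment (the trailing unflushed segment included, so bad characters there still raise), dropping the last product and joining the rest.
import Mathlib
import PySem

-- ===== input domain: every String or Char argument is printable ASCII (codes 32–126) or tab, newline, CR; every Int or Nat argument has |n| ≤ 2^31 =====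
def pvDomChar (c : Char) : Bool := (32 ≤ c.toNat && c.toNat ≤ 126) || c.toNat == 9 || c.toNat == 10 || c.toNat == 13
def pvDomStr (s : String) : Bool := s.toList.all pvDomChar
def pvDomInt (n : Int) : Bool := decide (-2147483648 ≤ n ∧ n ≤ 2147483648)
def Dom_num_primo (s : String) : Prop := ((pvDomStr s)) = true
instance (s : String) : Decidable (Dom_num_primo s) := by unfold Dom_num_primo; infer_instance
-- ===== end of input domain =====

-- B replaces A's accumulator-and-flush single pass by split('/') + one product per segment (idiomatic decomposition; same cost).


-- the module-level dict (shared by A and B, like the Python module constant)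
def nucleotideos : PySem.Dict Char Int :=
  PySem.Dict.ofList [('a',2), ('c',3), ('g',5), ('t',7), ('n',210),
                     ('A',2), ('C',3), ('G',5), ('T',7), ('N',210)]

-- ===== PORT A =====
-- A: one pass over the characters with state (str_primos, lista_primos, acc);
-- nucleotideos[c] is getD with default 0, exact on Pre_ (KeyError inputs are excluded by Pre_).
def num_primo (s : String) : String × List Int :=
  let st := s.toList.foldl
    (fun (st : List Char × List Int × Int) c =>
      if c = '/' then (st.1 ++ PySem.Int.toChars st.2.2 ++ ['/'], st.2.1 ++ [st.2.2], 1)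
      else (st.1, st.2.1, st.2.2 * nucleotideos.getD c 0))
    ([], [], 1)
  (String.ofList st.1, st.2.1)

-- ===== PORT B =====
-- B: split on '/' (List.splitOn matches Python str.split for a single-char separator),
-- a product per segment, drop the last, join.
def segProd (seg : List Char) : Int :=
  seg.foldl (fun p c => p * nucleotideos.getD c 0) 1

def num_primo_alt (s : String) : String × List Int :=
  let products := (List.splitOn '/' s.toList).map segProd
  let lista := products.dropLast
  (String.ofList (PySem.Chars.join [] (lista.map (fun p => PySem.Int.toChars p ++ ['/']))), lista)

-- ===== PRECONDITION & SPEC =====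
-- Pre_ excludes exactly the inputs on which Python A raises KeyError: a character that is
-- neither '/' nor a key of nucleotideos (B raises the same KeyError there).
def Pre_num_primo (s : String) : Prop :=
  s.toList.all (fun c => c ∈ ['/', 'a', 'c', 'g', 't', 'n', 'A', 'C', 'G', 'T', 'N']) = true
instance (s : String) : Decidable (Pre_num_primo s) := by unfold Pre_num_primo; infer_instance
def pvWitness_num_primo : String := "acgt/ta/n"

def Spec_num_primo (s : String) (out : String × List Int) : Prop := out = num_primo_alt s
instance (s : String) (out : String × List Int) : Decidable (Spec_num_primo s out) := by unfold Spec_num_primo; infer_instance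

-- ===== CLAIM (what is proved, stated in full; the proofs are below) =====
def Claim_equal_num_primo : Prop := ∀ (s : String), Dom_num_primo s → Pre_num_primo s → Spec_num_primo s (num_primo s)

-- ===== LEMMAS AND PROOFS =====

-- B's products of the '/'-split of cs, with the first (open) segment's product seeded by acc
def scaled (acc : Int) (cs : List Char) : List Int :=
  match List.splitOn '/' cs with
  | [] => []
  | h :: t => (acc * segProd h) :: t.map segProd

lemma segProd_scale (xs : List Char) (a : Int) :
    xs.foldl (fun p c => p * nucleotideos.getD c 0) a = a * segProd xs := by
  induction xs generalizing a with
  | nil => simp [segProd]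
  | cons x xs ih =>
    rw [List.foldl_cons, ih]
    have h2 : segProd (x :: xs) = nucleotideos.getD x 0 * segProd xs := by
      rw [segProd, List.foldl_cons, ih]; ring
    rw [h2]; ring

lemma splitOn_ne_nil (cs : List Char) : List.splitOn '/' cs ≠ [] := by
  simp [List.splitOn]
  exact List.splitOnP_ne_nil _ _

lemma splitOn_cons_slash (cs : List Char) :
    List.splitOn '/' ('/' :: cs) = [] :: List.splitOn '/' cs := by
  simp [List.splitOn, List.splitOnP_cons]

lemma splitOn_cons_ne (c : Char) (cs : List Char) (h : c ≠ '/') :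
    List.splitOn '/' (c :: cs) = (List.splitOn '/' cs).modifyHead (List.cons c) := by
  simp [List.splitOn, List.splitOnP_cons, h]

lemma scaled_cons_ne (c : Char) (cs : List Char) (acc : Int) (h : c ≠ '/') :
    scaled acc (c :: cs) = scaled (acc * nucleotideos.getD c 0) cs := by
  unfold scaled
  rw [splitOn_cons_ne c cs h]
  rcases hs : List.splitOn '/' cs with _ | ⟨h1, t⟩
  · exact absurd hs (splitOn_ne_nil cs)
  · simp only [List.modifyHead]
    have h2 : segProd (c :: h1) = nucleotideos.getD c 0 * segProd h1 := by
      rw [segProd, List.foldl_cons, segProd_scale]; ring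
    rw [h2, ← mul_assoc]

lemma scaled_one (cs : List Char) :
    scaled 1 cs = (List.splitOn '/' cs).map segProd := by
  unfold scaled
  rcases hs : List.splitOn '/' cs with _ | ⟨h1, t⟩
  · simp
  · simp

lemma scaled_slash (cs : List Char) (acc : Int) :
    scaled acc ('/' :: cs) = acc :: scaled 1 cs := by
  unfold scaled
  rw [splitOn_cons_slash]
  rcases hs : List.splitOn '/' cs with _ | ⟨h1, t⟩
  · exact absurd hs (splitOn_ne_nil cs)
  · simp [segProd]

lemma scaled_ne_nil (acc : Int) (cs : List Char) : scaled acc cs ≠ [] := by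
  unfold scaled
  rcases hs : List.splitOn '/' cs with _ | ⟨h1, t⟩
  · exact absurd hs (splitOn_ne_nil cs)
  · simp

lemma join_nil_flatten (L : List (List Char)) : PySem.Chars.join [] L = L.flatten := by
  induction L with
  | nil => simp [PySem.Chars.join, List.intercalate]
  | cons a t ih =>
    cases t with
    | nil => simp [PySem.Chars.join_singleton]
    | cons b t' =>
      rw [PySem.Chars.join_cons_cons, ih]
      simp

-- the loop invariant: A's fold from (str0, lst0, acc) appends exactly B's dropLast data
lemma fold_invariant (cs : List Char) (str0 : List Char) (lst0 : List Int) (acc : Int) :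
    cs.foldl
      (fun (st : List Char × List Int × Int) c =>
        if c = '/' then (st.1 ++ PySem.Int.toChars st.2.2 ++ ['/'], st.2.1 ++ [st.2.2], 1)
        else (st.1, st.2.1, st.2.2 * nucleotideos.getD c 0))
      (str0, lst0, acc)
    = (str0 ++ (((scaled acc cs).dropLast).map (fun p => PySem.Int.toChars p ++ ['/'])).flatten,
       lst0 ++ (scaled acc cs).dropLast,
       (scaled acc cs).getLastD 1) := by
  induction cs generalizing str0 lst0 acc with
  | nil =>
    simp [scaled, List.splitOn, List.splitOnP, List.splitOnP.go, segProd]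
  | cons c cs ih =>
    by_cases hc : c = '/'
    · subst hc
      rw [List.foldl_cons, if_pos rfl, ih, scaled_slash]
      have hne := scaled_ne_nil 1 cs
      rcases hL : scaled 1 cs with _ | ⟨b, L'⟩
      · exact absurd hL hne
      · simp
    · rw [List.foldl_cons, if_neg hc, ih, scaled_cons_ne c cs acc hc]

-- ===== VERDICT (by name: the statement is the Claim_ definition above) =====
theorem num_primo_spec : Claim_equal_num_primo := by
  intro s _ _
  unfold Spec_num_primo num_primo num_primo_alt
  rw [fold_invariant, scaled_one]
  simp only [join_nil_flatten]
  simp
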